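-- pv_equiv track=rewrite | github.com/Alpenl/soma-gpu | utils/stageii_benchmark.py | _sequence_chunk_ranges
-- ===== SOURCE A (Python) =====
-- def _sequence_chunk_ranges(total_frames, chunk_size, overlap):
--     if total_frames <= 0:
--         return []
--     chunk_size = int(chunk_size)
--     if chunk_size <= 0:
--         raise ValueError("chunk_size must be > 0")
--     overlap = int(overlap)
--     if overlap < 0:
--         raise ValueError("chunk_overlap must be >= 0")
--     step = max(chunk_size - overlap, 1)
--     ranges = []
--     start = 0
--     while start < total_frames:
--         end = min(start + chunk_size, total_frames)
--         ranges.append((start, end))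
--         if end >= total_frames:
--             break
--         start += step
--     return ranges
-- ===== SOURCE B (Python) =====
-- def _sequence_chunk_ranges(total_frames, chunk_size, overlap):
--     if total_frames <= 0:
--         return []
--     chunk_size = int(chunk_size)
--     if chunk_size <= 0:
--         raise ValueError("chunk_size must be > 0")
--     overlap = int(overlap)
--     if overlap < 0:
--         raise ValueError("chunk_overlap must be >= 0")
--     step = max(chunk_size - overlap, 1)
--     num = max(0, (total_frames - chunk_size + step - 1) // step) + 1
--     return [(i * step, min(i * step + chunk_size, total_frames)) for i in range(num)]
-- ===== Notes on version B (the rewrite author's own statement) =====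
-- stated objective: alternative
-- what changed: Replaces the stateful while-loop with break by a closed-form chunk count (ceiling division) and an index comprehension emitting each (start,end) pair directly.
-- outside the precondition, e.g. on _sequence_chunk_ranges(5, 0, 1): A raises ValueError, B raises ValueError; on _sequence_chunk_ranges(5, 3, -1): A raises ValueError, B raises ValueError
import Mathlib
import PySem

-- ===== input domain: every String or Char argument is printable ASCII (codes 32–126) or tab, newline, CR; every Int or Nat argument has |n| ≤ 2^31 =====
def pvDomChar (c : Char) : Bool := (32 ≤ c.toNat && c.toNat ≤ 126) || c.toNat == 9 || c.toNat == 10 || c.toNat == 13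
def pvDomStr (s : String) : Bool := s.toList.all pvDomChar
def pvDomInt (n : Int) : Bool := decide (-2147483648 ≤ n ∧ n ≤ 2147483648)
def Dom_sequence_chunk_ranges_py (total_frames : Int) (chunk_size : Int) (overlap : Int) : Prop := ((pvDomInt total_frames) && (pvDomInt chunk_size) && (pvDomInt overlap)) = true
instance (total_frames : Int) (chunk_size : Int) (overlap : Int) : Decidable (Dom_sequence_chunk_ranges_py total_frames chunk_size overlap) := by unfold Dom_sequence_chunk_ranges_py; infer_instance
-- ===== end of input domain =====

-- B replaces A's stateful while-loop (with break) by a closed-form chunk count and an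
-- index comprehension; same cost, different decomposition ("alternative").


-- ===== PORT A =====
-- the while loop of A: start advances by step ≥ 1 until the chunk end reaches total_frames
def pvLoopA (T C step : Int) (hstep : 1 ≤ step) (start : Int) : List (Int × Int) :=
  if _h : start < T then
    let e := min (start + C) T
    if T ≤ e then [(start, e)]
    else (start, e) :: pvLoopA T C step hstep (start + step)
  else []
termination_by (T - start).toNat
decreasing_by omega

def sequence_chunk_ranges_py (total_frames : Int) (chunk_size : Int) (overlap : Int) : List (Int × Int) :=
  if total_frames ≤ 0 then []
  else if chunk_size ≤ 0 then []        -- ValueError in Python; outside Pre_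
  else if overlap < 0 then []           -- ValueError in Python; outside Pre_
  else pvLoopA total_frames chunk_size (max (chunk_size - overlap) 1) (le_max_right _ _) 0

-- ===== PORT B =====
def sequence_chunk_ranges_py_alt (total_frames : Int) (chunk_size : Int) (overlap : Int) : List (Int × Int) :=
  if total_frames ≤ 0 then []
  else if chunk_size ≤ 0 then []        -- ValueError in Python; outside Pre_
  else if overlap < 0 then []           -- ValueError in Python; outside Pre_
  else
    let step := max (chunk_size - overlap) 1
    let num := max 0 (PySem.Int.floordiv (total_frames - chunk_size + step - 1) step) + 1
    (PySem.List.pyRange 0 num 1).map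
      (fun i => (i * step, min (i * step + chunk_size) total_frames))

-- ===== PRECONDITION & SPEC =====
-- Pre_ excludes exactly the inputs on which Python A raises ValueError: total_frames > 0
-- together with chunk_size ≤ 0 or overlap < 0 (B raises the same errors there).
def Pre_sequence_chunk_ranges_py (total_frames : Int) (chunk_size : Int) (overlap : Int) : Prop :=
  total_frames ≤ 0 ∨ (0 < chunk_size ∧ 0 ≤ overlap)
instance (total_frames : Int) (chunk_size : Int) (overlap : Int) : Decidable (Pre_sequence_chunk_ranges_py total_frames chunk_size overlap) := by unfold Pre_sequence_chunk_ranges_py; infer_instance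
def pvWitness_sequence_chunk_ranges_py : Int × Int × Int := (10, 4, 2)

def Spec_sequence_chunk_ranges_py (total_frames : Int) (chunk_size : Int) (overlap : Int) (out : List (Int × Int)) : Prop := out = sequence_chunk_ranges_py_alt total_frames chunk_size overlap
instance (total_frames : Int) (chunk_size : Int) (overlap : Int) (out : List (Int × Int)) : Decidable (Spec_sequence_chunk_ranges_py total_frames chunk_size overlap out) := by unfold Spec_sequence_chunk_ranges_py; infer_instance

-- ===== CLAIM (what is proved, stated in full; the proofs are below) =====
def Claim_equal_sequence_chunk_ranges_py : Prop := ∀ (total_frames : Int) (chunk_size : Int) (overlap : Int), Dom_sequence_chunk_ranges_py total_frames chunk_size overlap → Pre_sequence_chunk_ranges_py total_frames chunk_size overlap → Spec_sequence_chunk_ranges_py total_frames chunk_size overlap (sequence_chunk_ranges_py total_frames chunk_size overlap)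

-- ===== LEMMAS AND PROOFS =====

-- the loop of A, started anywhere below T, equals the closed-form comprehension of B
lemma pvLoopA_eq (T C step : Int) (hstep : 1 ≤ step) (hC : step ≤ C) :
    ∀ (n : Nat) (start : Int), (T - start).toNat ≤ n → start < T →
      pvLoopA T C step hstep start =
        (PySem.List.pyRange 0 (max 0 (PySem.Int.floordiv (T - start - C + step - 1) step) + 1) 1).map
          (fun i => (start + i * step, min (start + i * step + C) T)) := by
  intro n
  induction n with
  | zero => intro start hn hlt; omega
  | succ n ih =>
    intro start hn hlt
    rw [pvLoopA]
    rw [dif_pos hlt]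
    by_cases hbr : T ≤ min (start + C) T
    · -- break case: start + C ≥ T, one chunk left
      have hTC : T ≤ start + C := by omega
      have hq : PySem.Int.floordiv (T - start - C + step - 1) step < 1 := by
        rw [PySem.Int.floordiv_lt_iff_lt_mul (by omega)]; omega
      have hmax : max 0 (PySem.Int.floordiv (T - start - C + step - 1) step) = 0 := by omega
      rw [if_pos hbr, hmax]
      rw [show (0 : Int) + 1 = 1 by ring, PySem.List.pyRange_one]
      simp
    · -- continue case
      have hlt2 : start + C < T := by omega
      rw [if_neg hbr]
      have hlt' : start + step < T := by omega
      have hn' : (T - (start + step)).toNat ≤ n := by omega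
      rw [ih (start + step) hn' hlt']
      set x : Int := T - start - C + step - 1 with hx
      have hxpos : step ≤ x := by omega
      have hq1 : 1 ≤ PySem.Int.floordiv x step := by
        rw [PySem.Int.le_floordiv_iff_mul_le (by omega)]; omega
      set q : Int := PySem.Int.floordiv x step with hqdef
      have hqb : q * step ≤ x ∧ x < (q + 1) * step := by
        rw [← PySem.Int.floordiv_eq_iff_of_pos (by omega)]
      have hq' : PySem.Int.floordiv (T - (start + step) - C + step - 1) step = q - 1 := by
        rw [PySem.Int.floordiv_eq_iff_of_pos (by omega)]
        constructor
        · have := hqb.1; nlinarith [hqb.1]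
        · have : T - (start + step) - C + step - 1 = x - step := by omega
          rw [this]; nlinarith [hqb.2]
      rw [hq']
      have hm1 : max 0 q = q := by omega
      have hm2 : max 0 (q - 1) = q - 1 := by omega
      rw [hm1, hm2]
      have hmin : min (start + C) T = start + C := by omega
      rw [hmin]
      rw [PySem.List.pyRange_one, PySem.List.pyRange_one]
      have hcount : (q + 1 - 0).toNat = (q - 1 + 1 - 0).toNat + 1 := by omega
      rw [hcount, List.range_succ_eq_map]
      simp only [List.map_cons, List.map_map]
      congr 1
      · simp; omega
      · apply List.map_congr_left
        intro k _
        simp only [Function.comp]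
        have h1 : start + step + (0 + (k:Int)) * step = start + (0 + ((k:Int)+1)) * step := by ring
        have h2 : ((Nat.succ k : Nat) : Int) = (k:Int) + 1 := by push_cast; ring
        simp [h2]
        constructor
        · ring
        · congr 1; ring

-- ===== VERDICT (by name: the statement is the Claim_ definition above) =====
theorem sequence_chunk_ranges_py_spec : Claim_equal_sequence_chunk_ranges_py := by
  intro T C O _ hpre
  unfold Spec_sequence_chunk_ranges_py sequence_chunk_ranges_py sequence_chunk_ranges_py_alt
  by_cases hT : T ≤ 0
  · simp [hT]
  · rw [if_neg hT, if_neg hT]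
    rcases hpre with h | ⟨hC, hO⟩
    · omega
    · rw [if_neg (by omega), if_neg (by omega), if_neg (by omega), if_neg (by omega)]
      have hstep1 : (1 : Int) ≤ max (C - O) 1 := le_max_right _ _
      have hstepC : max (C - O) 1 ≤ C := by omega
      rw [pvLoopA_eq T C (max (C - O) 1) hstep1 hstepC (T - 0).toNat 0 (by omega) (by omega)]
      simp
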